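-- pv_equiv track=rewrite | github.com/bssrdf/pyleet | D/DestroySequentialTargets.py | destroyTargets2
-- ===== SOURCE A (Python) =====
-- from typing import List
--
-- def destroyTargets2(nums: List[int], space: int) -> int:
--     A, k, n, = nums, space, len(nums)
--     ans, dp = 10**9, {}
--     for i in range(n):
--         if A[i]%k in dp:
--             dp[A[i]%k] += 1
--         else:
--             dp[A[i]%k] = 1
--     mxf, vals = 0, set()
--     for i in dp:
--         if mxf < dp[i]:
--             mxf = dp[i]
--             vals = {i}
--         elif mxf == dp[i]:
--             vals.add(i)
--     for a in A:
--         if a%k in vals: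
--             ans = min(ans, a)
--     return ans
-- ===== SOURCE B (Python) =====
-- def destroyTargets2(nums, space):
--     # one pass: remainder -> (count, min value with that remainder); no rescan of nums
--     stats = {}
--     for a in nums:
--         r = a % space
--         if r in stats:
--             c, m = stats[r]
--             stats[r] = (c + 1, m if m < a else a)
--         else:
--             stats[r] = (1, a)
--     mxf = 0
--     for c, _ in stats.values():
--         if c > mxf:
--             mxf = c
--     best = 10**9
--     for c, m in stats.values():
--         if c == mxf and m < best:
--             best = m
--     return best
-- ===== Notes on version B (the rewrite author's own statement) =====
-- stated objective: simpler
-- what changed: B maintains the minimum value per remainder inline in a single counting pass and reads the answer off the dict, removing A's argmax remainder-set and its third full rescan of nums.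
import Mathlib
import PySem

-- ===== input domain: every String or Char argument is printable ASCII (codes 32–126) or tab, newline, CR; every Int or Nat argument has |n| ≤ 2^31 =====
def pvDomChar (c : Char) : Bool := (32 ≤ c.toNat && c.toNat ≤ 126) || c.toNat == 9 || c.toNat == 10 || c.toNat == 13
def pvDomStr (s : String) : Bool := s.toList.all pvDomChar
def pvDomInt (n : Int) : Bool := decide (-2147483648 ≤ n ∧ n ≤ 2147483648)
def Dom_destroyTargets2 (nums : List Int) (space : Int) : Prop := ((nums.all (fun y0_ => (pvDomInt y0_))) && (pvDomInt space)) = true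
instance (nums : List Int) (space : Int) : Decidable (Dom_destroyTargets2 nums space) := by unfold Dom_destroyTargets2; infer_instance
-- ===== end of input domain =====

-- B keeps the per-remainder minimum inline in the counting pass and reads the answer
-- off the dict, dropping A's argmax set and its final rescan of nums (objective: simpler).


-- ===== PORT A =====
def destroyTargets2 (nums : List Int) (space : Int) : Int :=
  let n : Int := nums.length
  let dp : PySem.Dict Int Int :=
    (PySem.List.pyRange 0 n 1).foldl (fun dp i =>
      let r := PySem.Int.mod (PySem.List.pyGetD nums i 0) space
      if dp.contains r then dp.insert r (dp.getD r 0 + 1)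
      else dp.insert r 1) PySem.Dict.empty
  let mv : Int × PySem.Set Int :=
    dp.keys.foldl (fun st i =>
      if st.1 < dp.getD i 0 then (dp.getD i 0, PySem.Set.ofList [i])
      else if st.1 = dp.getD i 0 then (st.1, PySem.Set.add st.2 i)
      else st) (0, PySem.Set.empty)
  nums.foldl (fun ans a =>
    if PySem.Set.contains mv.2 (PySem.Int.mod a space) then min ans a else ans) (10 ^ 9)

-- ===== PORT B =====
def destroyTargets2_alt (nums : List Int) (space : Int) : Int :=
  let stats : PySem.Dict Int (Int × Int) :=
    nums.foldl (fun d a =>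
      let r := PySem.Int.mod a space
      match d.get? r with
      | some (c, m) => d.insert r (c + 1, if m < a then m else a)
      | none => d.insert r (1, a)) PySem.Dict.empty
  let mxf : Int := stats.values.foldl (fun mxf p => if p.1 > mxf then p.1 else mxf) 0
  stats.values.foldl (fun best p => if p.1 = mxf ∧ p.2 < best then p.2 else best) (10 ^ 9)

-- ===== PRECONDITION & SPEC =====
-- Pre_ excludes only space = 0 with nonempty nums, where Python's a % space raises ZeroDivisionError.
def Pre_destroyTargets2 (nums : List Int) (space : Int) : Prop := nums = [] ∨ space ≠ 0
instance (nums : List Int) (space : Int) : Decidable (Pre_destroyTargets2 nums space) := by unfold Pre_destroyTargets2; infer_instance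
def pvWitness_destroyTargets2 : List Int × Int := ([3, 7, 8, 1, 1, 5], 2)

def Spec_destroyTargets2 (nums : List Int) (space : Int) (out : Int) : Prop := out = destroyTargets2_alt nums space
instance (nums : List Int) (space : Int) (out : Int) : Decidable (Spec_destroyTargets2 nums space out) := by unfold Spec_destroyTargets2; infer_instance

-- ===== CLAIM (what is proved, stated in full; the proofs are below) =====
def Claim_equal_destroyTargets2 : Prop := ∀ (nums : List Int) (space : Int), Dom_destroyTargets2 nums space → Pre_destroyTargets2 nums space → Spec_destroyTargets2 nums space (destroyTargets2 nums space)

-- ===== LEMMAS AND PROOFS =====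

-- helpers
def pvMnList : List Int → Int
  | [] => 0
  | x :: t => t.foldl min x

lemma pvMnList_append (g : List Int) (hg : g ≠ []) (x : Int) :
    pvMnList (g ++ [x]) = min (pvMnList g) x := by
  cases g with
  | nil => simp at hg
  | cons y t => simp [pvMnList, List.foldl_append]

lemma pvMnList_mem (g : List Int) (hg : g ≠ []) : pvMnList g ∈ g := by
  cases g with
  | nil => simp at hg
  | cons y t =>
    rcases PySem.List.foldl_min_mem t y with h | h
    · simp [pvMnList, h]
    · simp [pvMnList, h]

lemma pvMnList_le (g : List Int) (x : Int) (hx : x ∈ g) : pvMnList g ≤ x := by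
  cases g with
  | nil => simp at hx
  | cons y t =>
    rcases List.mem_cons.mp hx with rfl | h
    · exact (PySem.List.foldl_min_le t x).1
    · exact (PySem.List.foldl_min_le t y).2 x h

def pvGrp (f : Int → Int) (nums : List Int) (r : Int) : List Int :=
  nums.filter (fun a => f a == r)

def pvVal (f : Int → Int) (nums : List Int) (r : Int) : Int × Int :=
  (((nums.map f).count r : Int), pvMnList (pvGrp f nums r))

lemma pvGrp_ne_nil (f : Int → Int) (nums : List Int) {r : Int}
    (hr : r ∈ nums.map f) : pvGrp f nums r ≠ [] := by
  rcases List.mem_map.mp hr with ⟨a, ha, rfl⟩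
  intro hnil
  have : a ∈ pvGrp f nums (f a) := by simp [pvGrp, List.mem_filter, ha]
  rw [hnil] at this; simp at this

lemma statsB_items (f : Int → Int) (nums : List Int) :
    (nums.foldl (fun d a =>
        match d.get? (f a) with
        | some (c, m) => d.insert (f a) (c + 1, if m < a then m else a)
        | none => d.insert (f a) (1, a)) (PySem.Dict.empty : PySem.Dict Int (Int × Int))).items
    = (PySem.Set.ofList (nums.map f)).map (fun r => (r, pvVal f nums r)) := by
  induction nums using List.reverseRecOn with
  | nil => simp [PySem.Dict.empty, PySem.Set.ofList]
  | append_singleton nums x ih =>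
    rw [List.foldl_append]
    set step := (fun (d : PySem.Dict Int (Int × Int)) (a : Int) =>
        match d.get? (f a) with
        | some (c, m) => d.insert (f a) (c + 1, if m < a then m else a)
        | none => d.insert (f a) (1, a)) with hstep
    set d := nums.foldl step PySem.Dict.empty with hd
    have hkeys : d.keys = PySem.Set.ofList (nums.map f) := by
      have h1 : d.keys = d.items.map (·.1) := rfl
      rw [h1, ih, List.map_map]
      have h2 : ((·.1) ∘ fun r => (r, pvVal f nums r)) = (id : Int → Int) := by
        funext r; rfl
      rw [h2, List.map_id]
    have hnd : d.keys.Nodup := by rw [hkeys]; exact PySem.Set.nodup_ofList _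
    rw [List.foldl_cons, List.foldl_nil]
    by_cases hr : f x ∈ PySem.Set.ofList (nums.map f)
    · -- existing key
      have hmem : (f x, pvVal f nums (f x)) ∈ d.items := by
        rw [ih]; exact List.mem_map.mpr ⟨f x, hr, rfl⟩
      have hget : d.get? (f x) = some (pvVal f nums (f x)) :=
        PySem.Dict.get?_of_mem_items d hmem hnd
      have hcont : d.contains (f x) = true := by
        rw [PySem.Dict.contains_iff_mem_keys, hkeys]; exact hr
      simp only [hstep, hget, pvVal]
      rw [PySem.Dict.items_insert_of_contains d _ hcont, ih, List.map_map]
      have hK : PySem.Set.ofList ((nums ++ [x]).map f) = PySem.Set.ofList (nums.map f) := by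
        rw [List.map_append, List.map_singleton, PySem.Set.ofList_append_singleton,
          PySem.Set.add_of_mem hr]
      rw [hK]
      apply List.map_congr_left
      intro r hrK
      by_cases hrx : r = f x
      · subst hrx
        have hgne : pvGrp f nums (f x) ≠ [] :=
          pvGrp_ne_nil f nums ((PySem.Set.mem_ofList _ _).mp hr)
        have hgrp : pvGrp f (nums ++ [x]) (f x) = pvGrp f nums (f x) ++ [x] := by
          simp [pvGrp, List.filter_append]
        simp only [Function.comp_apply, beq_self_eq_true, if_true, pvVal, hgrp,
          pvMnList_append _ hgne, List.map_append, List.map_singleton, List.count_append,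
          Prod.mk.injEq]
        refine ⟨trivial, ?_, ?_⟩
        · push_cast; simp
        · rw [min_def]; split_ifs <;> omega
      · have hb : (r == f x) = false := by simp [hrx]
        have hxr : ¬ f x = r := fun h => hrx h.symm
        have hgrp : pvGrp f (nums ++ [x]) r = pvGrp f nums r := by
          simp [pvGrp, List.filter_append, hxr]
        simp only [Function.comp_apply, hb, Bool.false_eq_true, if_false, pvVal, hgrp,
          List.map_append, List.map_singleton, List.count_append]
        simp [hxr]
    · -- new key
      have hget : d.get? (f x) = none := by
        rw [PySem.Dict.get?_eq_none_iff_not_mem_keys, hkeys]; exact hr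
      have hcont : d.contains (f x) = false := by
        rw [← Bool.not_eq_true, PySem.Dict.contains_iff_mem_keys, hkeys]; exact hr
      simp only [hstep, hget]
      rw [PySem.Dict.items_insert_of_not_contains d _ hcont, ih]
      have hnL : f x ∉ nums.map f := fun h => hr ((PySem.Set.mem_ofList _ _).mpr h)
      have hK : PySem.Set.ofList ((nums ++ [x]).map f)
          = PySem.Set.ofList (nums.map f) ++ [f x] := by
        rw [List.map_append, List.map_singleton, PySem.Set.ofList_append_singleton,
          PySem.Set.add_of_not_mem hr]
      rw [hK, List.map_append, List.map_singleton]
      congr 1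
      · apply List.map_congr_left
        intro r hrK
        have hrx : r ≠ f x := fun h => hr (h ▸ hrK)
        have hxr : ¬ f x = r := fun h => hrx h.symm
        have hgrp : pvGrp f (nums ++ [x]) r = pvGrp f nums r := by
          simp [pvGrp, List.filter_append, hxr]
        simp only [pvVal, hgrp, List.map_append, List.map_singleton, List.count_append]
        simp [hxr]
      · have hgrp0 : pvGrp f nums (f x) = [] := by
          simp only [pvGrp, List.filter_eq_nil_iff, beq_iff_eq]
          intro a ha h
          exact hnL (List.mem_map.mpr ⟨a, ha, h⟩)
        have hgrp : pvGrp f (nums ++ [x]) (f x) = [x] := by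
          have h0 : nums.filter (fun a => f a == f x) = [] := hgrp0
          simp [pvGrp, List.filter_append, h0]
        have hc0 : (nums.map f).count (f x) = 0 := List.count_eq_zero.mpr hnL
        simp [pvVal, hgrp, pvMnList, List.map_append, List.count_append, hc0]

lemma mv_fold_char (c : Int → Int) (Kl : List Int) (m0 : Int) (v0 : PySem.Set Int) :
    (Kl.foldl (fun st r =>
        if st.1 < c r then (c r, PySem.Set.ofList [r])
        else if st.1 = c r then (st.1, PySem.Set.add st.2 r)
        else st) (m0, v0)).1 = Kl.foldl (fun m r => max m (c r)) m0
    ∧ ∀ x, (x ∈ (Kl.foldl (fun st r =>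
        if st.1 < c r then (c r, PySem.Set.ofList [r])
        else if st.1 = c r then (st.1, PySem.Set.add st.2 r)
        else st) (m0, v0)).2
      ↔ (x ∈ v0 ∧ m0 = Kl.foldl (fun m r => max m (c r)) m0)
        ∨ (x ∈ Kl ∧ c x = Kl.foldl (fun m r => max m (c r)) m0)) := by
  induction Kl generalizing m0 v0 with
  | nil => simp
  | cons r t ih =>
    simp only [List.foldl_cons]
    have hM := PySem.List.le_foldl_max_int t c (max m0 (c r))
    by_cases h1 : m0 < c r
    · have hmax : max m0 (c r) = c r := by omega
      rw [if_pos h1]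
      rcases ih (c r) (PySem.Set.ofList [r]) with ⟨ihl, ihr⟩
      rw [hmax]
      refine ⟨ihl, fun x => ?_⟩
      rw [ihr x]
      have hcrM : c r ≤ t.foldl (fun m r => max m (c r)) (c r) := by
        have := (PySem.List.le_foldl_max_int t c (c r)).1; exact this
      constructor
      · rintro (⟨hx, hm⟩ | ⟨hx, hc⟩)
        · have : x = r := by simpa [PySem.Set.ofList] using hx
          subst this
          exact Or.inr ⟨List.mem_cons_self, by omega⟩
        · exact Or.inr ⟨List.mem_cons_of_mem _ hx, hc⟩
      · rintro (⟨hx, hm⟩ | ⟨hx, hc⟩)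
        · omega
        · rcases List.mem_cons.mp hx with rfl | hx'
          · exact Or.inl ⟨by simp [PySem.Set.ofList], hc⟩
          · exact Or.inr ⟨hx', hc⟩
    · by_cases h2 : m0 = c r
      · have hmax : max m0 (c r) = m0 := by omega
        rw [if_neg h1, if_pos h2]
        rcases ih m0 (PySem.Set.add v0 r) with ⟨ihl, ihr⟩
        rw [hmax]
        refine ⟨ihl, fun x => ?_⟩
        rw [ihr x]
        constructor
        · rintro (⟨hx, hm⟩ | ⟨hx, hc⟩)
          · rcases (PySem.Set.mem_add _ _ _).mp hx with hx' | rfl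
            · exact Or.inl ⟨hx', hm⟩
            · exact Or.inr ⟨List.mem_cons_self, by omega⟩
          · exact Or.inr ⟨List.mem_cons_of_mem _ hx, hc⟩
        · rintro (⟨hx, hm⟩ | ⟨hx, hc⟩)
          · exact Or.inl ⟨(PySem.Set.mem_add _ _ _).mpr (Or.inl hx), hm⟩
          · rcases List.mem_cons.mp hx with rfl | hx'
            · exact Or.inl ⟨(PySem.Set.mem_add _ _ _).mpr (Or.inr rfl), by omega⟩
            · exact Or.inr ⟨hx', hc⟩
      · have h3 : c r < m0 := by omega
        have hmax : max m0 (c r) = m0 := by omega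
        rw [if_neg h1, if_neg h2]
        rcases ih m0 v0 with ⟨ihl, ihr⟩
        rw [hmax]
        refine ⟨ihl, fun x => ?_⟩
        rw [ihr x]
        have hm0M : m0 ≤ t.foldl (fun m r => max m (c r)) m0 :=
          (PySem.List.le_foldl_max_int t c m0).1
        constructor
        · rintro (⟨hx, hm⟩ | ⟨hx, hc⟩)
          · exact Or.inl ⟨hx, hm⟩
          · exact Or.inr ⟨List.mem_cons_of_mem _ hx, hc⟩
        · rintro (⟨hx, hm⟩ | ⟨hx, hc⟩)
          · exact Or.inl ⟨hx, hm⟩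
          · rcases List.mem_cons.mp hx with rfl | hx'
            · omega
            · exact Or.inr ⟨hx', hc⟩

lemma foldl_if_min_filter_map (P : Int → Bool) (g : Int → Int) :
    ∀ (l : List Int) (i : Int),
      l.foldl (fun b r => if P r then min b (g r) else b) i
        = ((l.filter P).map g).foldl min i := by
  intro l
  induction l with
  | nil => intro i; rfl
  | cons r t ih =>
    intro i
    by_cases h : P r
    · simp [List.foldl_cons, h, ih]
    · simp [List.foldl_cons, h, ih]

lemma foldl_min_eq_of (i : Int) (xs ys : List Int)
    (h1 : ∀ y ∈ ys, y ∈ xs) (h2 : ∀ x ∈ xs, ∃ y ∈ ys, y ≤ x) :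
    xs.foldl min i = ys.foldl min i := by
  apply le_antisymm
  · rcases PySem.List.foldl_min_mem ys i with h | h
    · rw [h]; exact (PySem.List.foldl_min_le xs i).1
    · exact (PySem.List.foldl_min_le xs i).2 _ (h1 _ h)
  · rcases PySem.List.foldl_min_mem xs i with h | h
    · rw [h]; exact (PySem.List.foldl_min_le ys i).1
    · rcases h2 _ h with ⟨y, hy, hyx⟩
      exact le_trans ((PySem.List.foldl_min_le ys i).2 _ hy) hyx

lemma dpA_char (f : Int → Int) (nums : List Int) :
    nums.foldl (fun d a =>
        if d.contains (f a) then d.insert (f a) (d.getD (f a) 0 + 1)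
        else d.insert (f a) 1) (PySem.Dict.empty : PySem.Dict Int Int)
    = (nums.map f).foldl (fun d x => d.insert x (d.getD x 0 + 1)) PySem.Dict.empty := by
  rw [List.foldl_map]
  apply PySem.List.foldl_congr_mem
  intro d a _
  by_cases h : d.contains (f a)
  · simp [h]
  · have hfalse : d.contains (f a) = false := by simpa using h
    have h0 : d.getD (f a) 0 = 0 := PySem.Dict.getD_of_not_contains d 0 hfalse
    simp [h, h0]

def pvCnt (f : Int → Int) (nums : List Int) (r : Int) : Int := ((nums.map f).count r : Int)

def pvMn (f : Int → Int) (nums : List Int) (r : Int) : Int := pvMnList (pvGrp f nums r)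

def pvM (f : Int → Int) (nums : List Int) : Int :=
  (PySem.Set.ofList (nums.map f)).foldl (fun m r => max m (pvCnt f nums r)) 0

lemma foldl_if_min_filter (P : Int → Bool) :
    ∀ (l : List Int) (i : Int),
      l.foldl (fun b r => if P r then min b r else b) i = (l.filter P).foldl min i := by
  intro l
  induction l with
  | nil => intro i; rfl
  | cons r t ih =>
    intro i
    by_cases h : P r
    · simp [List.foldl_cons, h, ih]
    · simp [List.foldl_cons, h, ih]

lemma A_fold1 (nums : List Int) (space : Int) :
    (PySem.List.pyRange 0 (nums.length : Int) 1).foldl (fun dp i =>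
      let r := PySem.Int.mod (PySem.List.pyGetD nums i 0) space
      if dp.contains r then dp.insert r (dp.getD r 0 + 1) else dp.insert r 1)
      (PySem.Dict.empty : PySem.Dict Int Int)
    = (nums.map (fun a => PySem.Int.mod a space)).foldl
        (fun d x => d.insert x (d.getD x 0 + 1)) PySem.Dict.empty := by
  exact (PySem.List.foldl_pyRange_zero_pyGetD' nums 0
    (fun (dp : PySem.Dict Int Int) a =>
      let r := PySem.Int.mod a space
      if dp.contains r then dp.insert r (dp.getD r 0 + 1) else dp.insert r 1)
    PySem.Dict.empty).trans (dpA_char (fun a => PySem.Int.mod a space) nums)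

lemma core (f : Int → Int) (nums : List Int) :
    (let dp : PySem.Dict Int Int := (nums.map f).foldl (fun d x => d.insert x (d.getD x 0 + 1))
        (PySem.Dict.empty : PySem.Dict Int Int)
     let mv : Int × PySem.Set Int := dp.keys.foldl (fun (st : Int × PySem.Set Int) (i : Int) =>
        if st.1 < dp.getD i 0 then (dp.getD i 0, PySem.Set.ofList [i])
        else if st.1 = dp.getD i 0 then (st.1, PySem.Set.add st.2 i)
        else st) ((0 : Int), ([] : PySem.Set Int))
     nums.foldl (fun ans a =>
        if PySem.Set.contains mv.2 (f a) then min ans a else ans) (10 ^ 9 : Int))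
    = (let stats : PySem.Dict Int (Int × Int) := nums.foldl (fun d a =>
        match d.get? (f a) with
        | some (c, m) => d.insert (f a) (c + 1, if m < a then m else a)
        | none => d.insert (f a) (1, a)) (PySem.Dict.empty : PySem.Dict Int (Int × Int))
       let mxf : Int := stats.values.foldl (fun (mxf : Int) (p : Int × Int) => if p.1 > mxf then p.1 else mxf) (0 : Int)
       stats.values.foldl (fun (best : Int) (p : Int × Int) =>
         if p.1 = mxf ∧ p.2 < best then p.2 else best) (10 ^ 9 : Int)) := by
  -- characterize A's dict
  have hgetD : ∀ r, ((nums.map f).foldl (fun d x => d.insert x (d.getD x 0 + 1))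
      (PySem.Dict.empty : PySem.Dict Int Int)).getD r 0 = pvCnt f nums r := by
    intro r
    rw [PySem.Dict.getD_foldl_insert_add_one]
    simp [pvCnt, PySem.Dict.getD_empty]
  have hkeys : ((nums.map f).foldl (fun d x => d.insert x (d.getD x 0 + 1))
      (PySem.Dict.empty : PySem.Dict Int Int)).keys = PySem.Set.ofList (nums.map f) := by
    rw [PySem.Dict.keys_foldl_insert]
    rfl
  -- characterize B's dict values
  have hitems := statsB_items f nums
  have hvals : (nums.foldl (fun d a =>
      match d.get? (f a) with
      | some (c, m) => d.insert (f a) (c + 1, if m < a then m else a)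
      | none => d.insert (f a) (1, a)) (PySem.Dict.empty : PySem.Dict Int (Int × Int))).values
      = (PySem.Set.ofList (nums.map f)).map (fun r => (pvCnt f nums r, pvMn f nums r)) := by
    have h1 : (nums.foldl (fun d a =>
        match d.get? (f a) with
        | some (c, m) => d.insert (f a) (c + 1, if m < a then m else a)
        | none => d.insert (f a) (1, a)) (PySem.Dict.empty : PySem.Dict Int (Int × Int))).values
        = ((nums.foldl (fun d a =>
        match d.get? (f a) with
        | some (c, m) => d.insert (f a) (c + 1, if m < a then m else a)
        | none => d.insert (f a) (1, a)) (PySem.Dict.empty : PySem.Dict Int (Int × Int))).items).map (·.2) := rfl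
    rw [h1, hitems, List.map_map]
    rfl
  simp only [hgetD, hkeys, hvals]
  -- A's argmax loop
  obtain ⟨hmv1, hmv2⟩ := mv_fold_char (pvCnt f nums) (PySem.Set.ofList (nums.map f)) 0 ([] : PySem.Set Int)
  -- B's max loop is the same running max
  have hmaxstep : (fun (m : Int) (p : Int × Int) => if p.1 > m then p.1 else m)
      = (fun (m : Int) (p : Int × Int) => max m p.1) := by
    funext m p; rw [max_def]; split_ifs <;> omega
  have hmxf : ((PySem.Set.ofList (nums.map f)).map
        (fun r => (pvCnt f nums r, pvMn f nums r))).foldl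
        (fun mxf p => if p.1 > mxf then p.1 else mxf) 0 = pvM f nums := by
    rw [hmaxstep, List.foldl_map]
    rfl
  rw [hmxf]
  have hM1 : (PySem.Set.ofList (nums.map f)).foldl
      (fun m r => max m (pvCnt f nums r)) 0 = pvM f nums := rfl
  rw [hM1] at hmv1
  -- A's final scan: keep exactly the elements whose remainder count is maximal
  have hAcongr : nums.foldl (fun ans a =>
      if PySem.Set.contains ((PySem.Set.ofList (nums.map f)).foldl (fun st i =>
        if st.1 < pvCnt f nums i then (pvCnt f nums i, PySem.Set.ofList [i])
        else if st.1 = pvCnt f nums i then (st.1, PySem.Set.add st.2 i)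
        else st) ((0 : Int), ([] : PySem.Set Int))).2 (f a)
      then min ans a else ans) (10 ^ 9 : Int)
      = nums.foldl (fun ans a =>
        if (pvCnt f nums (f a) == pvM f nums) then min ans a else ans) (10 ^ 9 : Int) := by
    apply PySem.List.foldl_congr_mem
    intro acc a ha
    have hfa : f a ∈ PySem.Set.ofList (nums.map f) :=
      (PySem.Set.mem_ofList _ _).mpr (List.mem_map.mpr ⟨a, ha, rfl⟩)
    have hmem := hmv2 (f a)
    rw [hM1] at hmem
    by_cases hc : pvCnt f nums (f a) = pvM f nums
    · have hin : f a ∈ ((PySem.Set.ofList (nums.map f)).foldl (fun st i =>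
        if st.1 < pvCnt f nums i then (pvCnt f nums i, PySem.Set.ofList [i])
        else if st.1 = pvCnt f nums i then (st.1, PySem.Set.add st.2 i)
        else st) ((0 : Int), ([] : PySem.Set Int))).2 :=
        hmem.mpr (Or.inr ⟨hfa, hc⟩)
      simp [hin, hc]
    · have hnin : f a ∉ ((PySem.Set.ofList (nums.map f)).foldl (fun st i =>
        if st.1 < pvCnt f nums i then (pvCnt f nums i, PySem.Set.ofList [i])
        else if st.1 = pvCnt f nums i then (st.1, PySem.Set.add st.2 i)
        else st) ((0 : Int), ([] : PySem.Set Int))).2 := by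
        intro hin
        rcases hmem.mp hin with ⟨hx, _⟩ | ⟨_, hx⟩
        · simp at hx
        · exact hc hx
      simp [hnin, hc]
  rw [hAcongr, foldl_if_min_filter]
  -- B's final scan: min of the stored minima of the maximal remainders
  have hBstep : (fun (best : Int) (p : Int × Int) =>
        if p.1 = pvM f nums ∧ p.2 < best then p.2 else best)
      = (fun (best : Int) (p : Int × Int) =>
        if (p.1 == pvM f nums) then min best p.2 else best) := by
    funext b p
    by_cases h : p.1 = pvM f nums
    · simp only [h, beq_self_eq_true, if_true, true_and]
      rw [min_def]; split_ifs <;> omega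
    · simp [h]
  rw [hBstep, List.foldl_map, foldl_if_min_filter_map (fun r => pvCnt f nums r == pvM f nums) (pvMn f nums)]
  -- both are the min of the same values
  apply foldl_min_eq_of
  · intro y hy
    rcases List.mem_map.mp hy with ⟨r, hrf, rfl⟩
    rcases List.mem_filter.mp hrf with ⟨hrK, hrM⟩
    have hrL : r ∈ nums.map f := (PySem.Set.mem_ofList _ _).mp hrK
    have hgne := pvGrp_ne_nil f nums hrL
    have hymem : pvMn f nums r ∈ pvGrp f nums r := pvMnList_mem _ hgne
    rcases List.mem_filter.mp hymem with ⟨hynums, hyr⟩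
    have hfy : f (pvMn f nums r) = r := beq_iff_eq.mp hyr
    refine List.mem_filter.mpr ⟨hynums, ?_⟩
    rw [hfy]
    exact hrM
  · intro x hx
    rcases List.mem_filter.mp hx with ⟨hxnums, hxM⟩
    have hrK : f x ∈ PySem.Set.ofList (nums.map f) :=
      (PySem.Set.mem_ofList _ _).mpr (List.mem_map.mpr ⟨x, hxnums, rfl⟩)
    refine ⟨pvMn f nums (f x), List.mem_map.mpr ⟨f x, List.mem_filter.mpr ⟨hrK, hxM⟩, rfl⟩, ?_⟩
    exact pvMnList_le _ x (List.mem_filter.mpr ⟨hxnums, beq_self_eq_true (f x)⟩)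

theorem ports_eq (nums : List Int) (space : Int) :
    destroyTargets2 nums space = destroyTargets2_alt nums space :=
  Eq.trans
    (congrArg (fun dp : PySem.Dict Int Int =>
      nums.foldl (fun ans a =>
        if PySem.Set.contains ((dp.keys.foldl (fun st i =>
          if st.1 < dp.getD i 0 then (dp.getD i 0, PySem.Set.ofList [i])
          else if st.1 = dp.getD i 0 then (st.1, PySem.Set.add st.2 i)
          else st) ((0 : Int), ([] : PySem.Set Int))).2)
          (PySem.Int.mod a space)
        then min ans a else ans) (10 ^ 9 : Int))
      (A_fold1 nums space))
    (core (fun a => PySem.Int.mod a space) nums)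

-- ===== VERDICT (by name: the statement is the Claim_ definition above) =====
theorem destroyTargets2_spec : Claim_equal_destroyTargets2 := by
  intro nums space _ _
  unfold Spec_destroyTargets2
  exact ports_eq nums space
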